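-- pv_equiv track=rewrite | github.com/zqifdu/py_algorithm_practice | DynamicProgramming/ShortestSuperstring.py | extend_len
-- ===== SOURCE A (Python) =====
-- def extend_len(A):
--     extend_len_matrix = [[0] * len(A) for _ in range(len(A))]
--     for i in range(len(A)):
--         for j in range(len(A)):
--             if i != j:
--                 len_j = len(A[j])
--                 for extend_len in range(len_j + 1):
--                     if A[i].endswith(A[j][:len_j - extend_len]):
--                         extend_len_matrix[i][j] = extend_len
--                         break
--     return extend_len_matrix
-- ===== SOURCE B (Python) =====
-- def extend_len(A):
--     # Precompute, for each string, the set of all its suffixes; then for each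
--     # pair take the longest prefix of A[j] found in A[i]'s suffix set.
--     suffixes = [{s[p:] for p in range(len(s) + 1)} for s in A]
--     result = []
--     for i, suf in enumerate(suffixes):
--         row = []
--         for j, t in enumerate(A):
--             if i == j:
--                 row.append(0)
--             else:
--                 k = 0
--                 for m in range(1, len(t) + 1):
--                     if t[:m] in suf:
--                         k = m
--                 row.append(len(t) - k)
--         result.append(row)
--     return result
-- ===== Notes on version B (the rewrite author's own statement) =====
-- stated objective: faster
-- what changed: A scans extension lengths downward per pair with endswith and breaks on the first hit; B precomputes each string's suffix set once and, per pair, folds upward over prefix lengths keeping the longest prefix found in the suffix set.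
import Mathlib
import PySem

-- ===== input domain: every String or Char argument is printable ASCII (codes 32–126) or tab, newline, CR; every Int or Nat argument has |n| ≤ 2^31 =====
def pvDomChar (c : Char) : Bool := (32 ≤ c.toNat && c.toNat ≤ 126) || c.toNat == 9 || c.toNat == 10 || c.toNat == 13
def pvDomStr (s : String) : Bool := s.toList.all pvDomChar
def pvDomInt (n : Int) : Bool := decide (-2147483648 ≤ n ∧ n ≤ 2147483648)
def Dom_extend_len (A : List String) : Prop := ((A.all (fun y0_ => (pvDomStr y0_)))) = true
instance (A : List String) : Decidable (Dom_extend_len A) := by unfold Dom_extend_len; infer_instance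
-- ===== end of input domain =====

-- B replaces A's per-pair descending endswith scan (first hit wins) by a precomputed
-- suffix set per string and an ascending longest-matching-prefix fold; alternative structure, same values.

-- ===== PORT A =====
-- 'for extend_len in range(len_j+1): if A[i].endswith(A[j][:len_j-extend_len]): …; break' (0 if no break)
def pvLoopA (si sj : String) : List Int → Int
  | [] => 0
  | e :: rest =>
    if PySem.Str.endswith si (PySem.Str.slice sj none (some (PySem.Str.len sj - e))) then e
    else pvLoopA si sj rest

def extend_len (A : List String) : List (List Int) :=
  (PySem.List.pyRange 0 (A.length : Int) 1).map (fun i =>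
    (PySem.List.pyRange 0 (A.length : Int) 1).map (fun j =>
      if i ≠ j then
        let sj := PySem.List.pyGetD A j ""
        pvLoopA (PySem.List.pyGetD A i "") sj
          (PySem.List.pyRange 0 (PySem.Str.len sj + 1) 1)
      else 0))

-- ===== PORT B =====
-- {s[p:] for p in range(len(s)+1)}
def pvSuffixes (s : String) : PySem.Set String :=
  PySem.Set.ofList ((PySem.List.pyRange 0 (PySem.Str.len s + 1) 1).map
    (fun p => PySem.Str.slice s (some p) none))

def extend_len_alt (A : List String) : List (List Int) :=
  let suffixes := A.map pvSuffixes
  (PySem.List.enumerate suffixes 0).map (fun isuf =>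
    (PySem.List.enumerate A 0).map (fun jt =>
      if isuf.1 = jt.1 then 0
      else
        PySem.Str.len jt.2 -
          (PySem.List.pyRange 1 (PySem.Str.len jt.2 + 1) 1).foldl
            (fun k m =>
              if PySem.Set.contains isuf.2 (PySem.Str.slice jt.2 none (some m)) then m else k) 0))

-- ===== PRECONDITION & SPEC =====
def Spec_extend_len (A : List String) (out : List (List Int)) : Prop := out = extend_len_alt A
instance (A : List String) (out : List (List Int)) : Decidable (Spec_extend_len A out) := by unfold Spec_extend_len; infer_instance

-- ===== CLAIM (what is proved, stated in full; the proofs are below) =====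
def Claim_equal_extend_len : Prop := ∀ (A : List String), Dom_extend_len A → Spec_extend_len A (extend_len A)

-- ===== LEMMAS AND PROOFS =====

-- the shared overlap test: is the m-prefix of sj a suffix of si?
def pvQ (si sj : String) (m : Nat) : Bool :=
  PySem.Chars.endswith si.toList (sj.toList.take m)

lemma pvQ_zero (si sj : String) : pvQ si sj 0 = true := by
  unfold pvQ
  rw [List.take_zero, PySem.Chars.endswith_iff]
  exact List.nil_suffix

lemma pvSliceTo (s : String) (m : Nat) :
    (PySem.Str.slice s none (some (m : Int))).toList = s.toList.take m := by
  simp [PySem.Str.slice, PySem.List.slice_to_natCast]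

lemma pvSliceFrom (s : String) (q : Nat) :
    (PySem.Str.slice s (some (q : Int)) none).toList = s.toList.drop q := by
  simp [PySem.Str.slice, PySem.List.slice_from_natCast]

-- A's test at loop counter e = L - t is exactly pvQ at t
lemma pvTestA (si sj : String) (L : Nat) (hL : sj.toList.length = L) (t : Nat) :
    PySem.Str.endswith si
        (PySem.Str.slice sj none (some (PySem.Str.len sj - ((L : Int) - (t : Nat)))))
      = pvQ si sj t := by
  have harg : PySem.Str.len sj - ((L : Int) - (t : Nat)) = ((t : Nat) : Int) := by
    rw [PySem.Str.len_eq, hL]; omega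
  rw [harg, PySem.Str.endswith_eq, pvSliceTo]
  rfl

-- A's inner scan, started t steps before the end, returns L - findGreatest
lemma pvScanA (si sj : String) (L : Nat) (hL : sj.toList.length = L) :
    ∀ (t : Nat), t ≤ L → Nat.findGreatest (fun m => pvQ si sj m = true) L ≤ t →
      pvLoopA si sj (PySem.List.pyRange ((L : Int) - (t : Nat)) ((L : Int) + 1) 1)
        = (L : Int) - (Nat.findGreatest (fun m => pvQ si sj m = true) L : Int) := by
  intro t
  induction t with
  | zero =>
    intro _ hG
    have hG0 : Nat.findGreatest (fun m => pvQ si sj m = true) L = 0 := Nat.le_zero.mp hG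
    rw [PySem.List.pyRange_one_cons (by omega)]
    simp only [pvLoopA, pvTestA si sj L hL 0, pvQ_zero, if_true, hG0]
  | succ t ih =>
    intro ht hG
    rw [PySem.List.pyRange_one_cons (by omega)]
    by_cases hQ : pvQ si sj (t+1) = true
    · have hge : t+1 ≤ Nat.findGreatest (fun m => pvQ si sj m = true) L :=
        Nat.le_findGreatest ht hQ
      have heq : Nat.findGreatest (fun m => pvQ si sj m = true) L = t+1 := le_antisymm hG hge
      simp only [pvLoopA, pvTestA si sj L hL (t+1), hQ, if_true, heq]
    · have hGle : Nat.findGreatest (fun m => pvQ si sj m = true) L ≤ t := by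
        rcases Nat.lt_or_ge (Nat.findGreatest (fun m => pvQ si sj m = true) L) (t+1) with h | h
        · omega
        · exfalso
          have heq : Nat.findGreatest (fun m => pvQ si sj m = true) L = t+1 :=
            le_antisymm hG h
          have hspec := Nat.findGreatest_spec (m := 0) (P := fun m => pvQ si sj m = true)
            (Nat.zero_le L) (pvQ_zero si sj)
          rw [heq] at hspec
          exact hQ hspec
      simp only [pvLoopA, pvTestA si sj L hL (t+1), hQ]
      have harith : ((L : Int) - ((t+1 : Nat) : Int)) + 1 = (L : Int) - (t : Nat) := by
        push_cast; ring
      rw [harith]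
      exact ih (by omega) hGle
-- B's ascending fold computes findGreatest
lemma pvScanB (p : Int → Bool) (Q : Nat → Bool)
    (hp : ∀ m : Nat, 1 ≤ m → p (m : Int) = Q m) :
    ∀ (L : Nat), (PySem.List.pyRange 1 ((L : Int) + 1) 1).foldl
        (fun k m => if p m then m else k) 0
      = (Nat.findGreatest (fun m => Q m = true) L : Int) := by
  intro L
  induction L with
  | zero => simp [PySem.List.pyRange_one_eq_nil, Nat.findGreatest_zero]
  | succ L ih =>
    have hc : ((L+1 : Nat) : Int) + 1 = ((L : Int) + 1) + 1 := by push_cast; ring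
    rw [hc, PySem.List.pyRange_one_succ_right (by omega), List.foldl_append]
    simp only [List.foldl_cons, List.foldl_nil, ih]
    have hcast : ((L : Int) + 1) = ((L+1 : Nat) : Int) := by push_cast; ring
    rw [hcast, hp (L+1) (by omega), Nat.findGreatest_succ]
    by_cases h : Q (L+1) = true
    · simp [h]
    · simp [h]

-- membership in the suffix set is exactly "x is a suffix of si"
lemma pvContains_iff (si x : String) :
    PySem.Set.contains (pvSuffixes si) x = true ↔ x.toList <:+ si.toList := by
  show List.contains _ x = true ↔ _
  rw [List.contains_iff_mem, pvSuffixes, PySem.Set.mem_ofList, List.mem_map]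
  constructor
  · rintro ⟨p, hp, rfl⟩
    rw [PySem.List.mem_pyRange_one] at hp
    obtain ⟨q, rfl⟩ : ∃ q : Nat, p = (q : Int) := ⟨p.toNat, (Int.toNat_of_nonneg hp.1).symm⟩
    rw [pvSliceFrom]
    exact List.drop_suffix q si.toList
  · intro hs
    refine ⟨((si.toList.length - x.toList.length : Nat) : Int), ?_, ?_⟩
    · rw [PySem.List.mem_pyRange_one, PySem.Str.len_eq]
      constructor
      · positivity
      · have := List.IsSuffix.length_le hs
        omega
    · apply String.toList_inj.mp
      rw [pvSliceFrom]
      exact (List.suffix_iff_eq_drop.mp hs).symm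

-- B's membership test equals the shared overlap test
lemma pvTestB (si sj : String) (m : Nat) :
    PySem.Set.contains (pvSuffixes si) (PySem.Str.slice sj none (some (m : Int)))
      = pvQ si sj m := by
  by_cases h : pvQ si sj m = true
  · rw [h]
    rw [pvContains_iff, pvSliceTo]
    exact (PySem.Chars.endswith_iff _ _).mp h
  · rw [Bool.not_eq_true] at h
    rw [h, ← Bool.not_eq_true, pvContains_iff, pvSliceTo]
    intro hsuf
    have := (PySem.Chars.endswith_iff si.toList (sj.toList.take m)).mpr hsuf
    rw [pvQ] at h
    rw [this] at h
    exact Bool.true_eq_false.mp h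

-- the per-pair entries agree
lemma pvEntry (si sj : String) :
    pvLoopA si sj (PySem.List.pyRange 0 (PySem.Str.len sj + 1) 1)
      = PySem.Str.len sj -
          (PySem.List.pyRange 1 (PySem.Str.len sj + 1) 1).foldl
            (fun k m =>
              if PySem.Set.contains (pvSuffixes si) (PySem.Str.slice sj none (some m)) then m
              else k) 0 := by
  have h1 := pvScanA si sj sj.toList.length rfl sj.toList.length le_rfl
    (Nat.findGreatest_le sj.toList.length)
  rw [sub_self] at h1
  have h2 := pvScanB
    (fun m => PySem.Set.contains (pvSuffixes si) (PySem.Str.slice sj none (some m)))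
    (pvQ si sj) (fun m _ => pvTestB si sj m) sj.toList.length
  simp only [] at h2
  rw [PySem.Str.len_eq, h1, h2]

lemma pvGetElem_enumerate {α : Type} (xs : List α) (s : Int) (k : Nat) (h : k < xs.length) :
    (PySem.List.enumerate xs s)[k]'(by rw [PySem.List.length_enumerate]; exact h)
      = (s + (k : Int), xs[k]) := by
  induction xs generalizing s k with
  | nil => simp at h
  | cons x xs ih =>
    simp only [PySem.List.enumerate_cons]
    cases k with
    | zero => simp
    | succ k =>
      have hk : k < xs.length := by simpa using h
      simp only [List.getElem_cons_succ, ih (s+1) k hk]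
      simp only [Prod.mk.injEq]
      exact ⟨by push_cast; ring, trivial⟩

-- ===== VERDICT (by name: the statement is the Claim_ definition above) =====
theorem extend_len_spec : Claim_equal_extend_len := by
  intro A _
  show extend_len A = extend_len_alt A
  unfold extend_len extend_len_alt
  apply List.ext_getElem
  · simp [PySem.List.length_pyRange_one, PySem.List.length_enumerate]
  · intro i hi1 hi2
    have hiA : i < A.length := by
      simpa [PySem.List.length_pyRange_one] using hi1
    simp only [List.getElem_map]
    rw [PySem.List.getElem_pyRange_one,
      pvGetElem_enumerate (A.map pvSuffixes) 0 i (by simpa using hiA)]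
    apply List.ext_getElem
    · simp [PySem.List.length_pyRange_one, PySem.List.length_enumerate]
    · intro j hj1 hj2
      have hjA : j < A.length := by
        simpa [PySem.List.length_pyRange_one] using hj1
      simp only [List.getElem_map]
      rw [PySem.List.getElem_pyRange_one, pvGetElem_enumerate A 0 j hjA]
      simp only [zero_add]
      by_cases hij : i = j
      · subst hij
        simp
      · have h1 : ((i : Nat) : Int) ≠ ((j : Nat) : Int) := fun h => hij (Int.natCast_inj.mp h)
        rw [if_pos h1, if_neg h1]
        have hgi : PySem.List.pyGetD A ((i : Nat) : Int) "" = A[i] := by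
          rw [PySem.List.pyGetD_natCast, List.getD_eq_getElem A "" hiA]
        have hgj : PySem.List.pyGetD A ((j : Nat) : Int) "" = A[j] := by
          rw [PySem.List.pyGetD_natCast, List.getD_eq_getElem A "" hjA]
        simp only [hgi, hgj]
        exact pvEntry A[i] A[j]
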